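-- pv_equiv track=rewrite | github.com/tuffy/python-audio-tools | audiotools/id3.py | encode_syncsafe32
-- ===== SOURCE A (Python) =====
-- def encode_syncsafe32(i):
--     """given a 28 bit int, returns a 32 bit value
--     with sync-safe bits added
--
--     may raise ValueError is the value is negative
--     or larger than 28 bits"""
--
--     if i >= (2 ** 28):
--         raise ValueError("value too large")
--     elif i < 0:
--         raise ValueError("value cannot be negative")
--
--     value = 0
--
--     for x in range(4):
--         value |= ((i & 0x7F) << (x * 8))
--         i >>= 7
--
--     return value
-- ===== SOURCE B (Python) =====
-- def encode_syncsafe32(i):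
--     """given a 28 bit int, returns a 32 bit value
--     with sync-safe bits added
--
--     may raise ValueError is the value is negative
--     or larger than 28 bits"""
--
--     if i >= (2 ** 28):
--         raise ValueError("value too large")
--     elif i < 0:
--         raise ValueError("value cannot be negative")
--
--     return ((i & 0x7F) |
--             ((i & 0x3F80) << 1) |
--             ((i & 0x1FC000) << 2) |
--             ((i & 0xFE00000) << 3))
-- ===== Notes on version B (the rewrite author's own statement) =====
-- stated objective: simpler
-- what changed: replaces the loop with its in-place accumulator and destructive shrinking of i by a single closed-form mask-and-shift expression placing each seven-bit group into its byte
import Mathlib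
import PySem

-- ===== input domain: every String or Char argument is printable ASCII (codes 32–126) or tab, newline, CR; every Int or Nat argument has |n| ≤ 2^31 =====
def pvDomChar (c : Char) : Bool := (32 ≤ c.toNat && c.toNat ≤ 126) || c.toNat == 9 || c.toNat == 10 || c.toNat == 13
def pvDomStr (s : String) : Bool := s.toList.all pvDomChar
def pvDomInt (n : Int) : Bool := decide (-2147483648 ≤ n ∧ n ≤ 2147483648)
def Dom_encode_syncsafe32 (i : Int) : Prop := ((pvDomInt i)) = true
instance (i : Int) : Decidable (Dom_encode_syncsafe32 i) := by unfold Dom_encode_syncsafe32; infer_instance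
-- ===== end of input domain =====

-- B replaces A's 4-iteration accumulator loop (with destructive i >>= 7) by one closed-form
-- mask-and-shift expression; same guards, so Pre_ excludes exactly the inputs where both raise ValueError.


-- ===== PORT A =====
-- loop 'for x in range(4): value |= (i & 0x7F) << (x*8); i >>= 7' as a fold over (value, i)
def encode_syncsafe32 (i : Int) : Int :=
  let st := (PySem.List.pyRange 0 4 1).foldl
    (fun (st : Int × Int) x =>
      let sh : Nat := (x * 8).toNat
      (PySem.Int.bor st.1 ((PySem.Int.band st.2 0x7F) <<< sh), st.2 >>> (7:Nat)))
    (0, i)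
  st.1

-- ===== PORT B =====
def encode_syncsafe32_alt (i : Int) : Int :=
  PySem.Int.bor
    (PySem.Int.bor
      (PySem.Int.bor (PySem.Int.band i 0x7F) ((PySem.Int.band i 0x3F80) <<< (1:Nat)))
      ((PySem.Int.band i 0x1FC000) <<< (2:Nat)))
    ((PySem.Int.band i 0xFE00000) <<< (3:Nat))

-- ===== PRECONDITION & SPEC =====
-- A (and B) raise ValueError exactly when i ≥ 2^28 or i < 0; Pre_ excludes exactly those inputs.
def Pre_encode_syncsafe32 (i : Int) : Prop := 0 ≤ i ∧ i < 2 ^ 28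
instance (i : Int) : Decidable (Pre_encode_syncsafe32 i) := by unfold Pre_encode_syncsafe32; infer_instance
def pvWitness_encode_syncsafe32 : Int := (1000000)
def Spec_encode_syncsafe32 (i : Int) (out : Int) : Prop := out = encode_syncsafe32_alt i
instance (i : Int) (out : Int) : Decidable (Spec_encode_syncsafe32 i out) := by unfold Spec_encode_syncsafe32; infer_instance

-- ===== CLAIM (what is proved, stated in full; the proofs are below) =====
def Claim_equal_encode_syncsafe32 : Prop := ∀ (i : Int), Dom_encode_syncsafe32 i → Pre_encode_syncsafe32 i → Spec_encode_syncsafe32 i (encode_syncsafe32 i)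

-- ===== LEMMAS AND PROOFS =====

-- masking a field in place equals extracting, masking low, and shifting back
theorem mask_shift_eq (n k : Nat) : n &&& (127 <<< k) = ((n >>> k) &&& 127) <<< k := by
  apply Nat.eq_of_testBit_eq
  intro j
  simp [Nat.testBit_and, Nat.testBit_shiftLeft, Nat.testBit_shiftRight]
  by_cases h : k ≤ j
  · simp [h, Nat.add_sub_cancel' h]
  · simp [h]

theorem castR (n k : Nat) : ((n : Int) >>> k) = ((n >>> k : Nat) : Int) := by
  simp [Int.shiftRight_eq, Int.natCast_shiftRight]

theorem castL (n k : Nat) : ((n : Int) <<< k) = ((n <<< k : Nat) : Int) := by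
  simp [Int.shiftLeft_eq, Int.natCast_shiftLeft]

theorem shiftLeft_comp (x a b : Nat) : (x <<< a) <<< b = x <<< (a + b) := by
  simp [Nat.shiftLeft_eq, pow_add, mul_assoc]

-- the Nat-level identity: the unrolled loop result equals the closed-form expression
theorem key (n : Nat) :
    0 ||| ((n &&& 127) <<< 0) ||| (((n >>> 7) &&& 127) <<< 8)
      ||| (((n >>> 7 >>> 7) &&& 127) <<< 16) ||| (((n >>> 7 >>> 7 >>> 7) &&& 127) <<< 24)
    = (n &&& 127) ||| ((n &&& 16256) <<< 1) ||| ((n &&& 2080768) <<< 2)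
      ||| ((n &&& 266338304) <<< 3) := by
  have h7 : (16256 : Nat) = 127 <<< 7 := by decide
  have h14 : (2080768 : Nat) = 127 <<< 14 := by decide
  have h21 : (266338304 : Nat) = 127 <<< 21 := by decide
  rw [h7, h14, h21, mask_shift_eq, mask_shift_eq, mask_shift_eq,
    shiftLeft_comp, shiftLeft_comp, shiftLeft_comp]
  simp only [← Nat.shiftRight_add]
  norm_num

-- ===== VERDICT (by name: the statement is the Claim_ definition above) =====
theorem encode_syncsafe32_spec : Claim_equal_encode_syncsafe32 := by
  intro i _ hpre
  obtain ⟨n, rfl⟩ := Int.eq_ofNat_of_zero_le hpre.1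
  show encode_syncsafe32 (n : Int) = encode_syncsafe32_alt (n : Int)
  have hr : PySem.List.pyRange 0 4 1 = [0, 1, 2, 3] := by decide
  simp only [encode_syncsafe32, encode_syncsafe32_alt, hr, List.foldl,
    show ((0:Int)*8).toNat = 0 from rfl, show ((1:Int)*8).toNat = 8 from rfl,
    show ((2:Int)*8).toNat = 16 from rfl, show ((3:Int)*8).toNat = 24 from rfl]
  simp only [castR, show ((127:Int)) = ((127:Nat):Int) from rfl,
    show ((16256:Int)) = ((16256:Nat):Int) from rfl,
    show ((2080768:Int)) = ((2080768:Nat):Int) from rfl,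
    show ((266338304:Int)) = ((266338304:Nat):Int) from rfl,
    show ((0:Int)) = ((0:Nat):Int) from rfl,
    PySem.Int.band_natCast, castL, PySem.Int.bor_natCast]
  exact_mod_cast key n
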